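-- pv_equiv track=rewrite | github.com/a-nowek/advent-of-code-2023 | 3/utils.py | transform_indexed_digits_to_values
-- ===== SOURCE A (Python) =====
-- from functools import reduce
--
-- def parse_to_integers(values: list[int], value: str) -> list[int]:
--     values.append(int(value))
--     return values
--
-- def transform_indexed_digits_to_values(
--     index_digits: list[tuple[int, int]]
-- ) -> list[int]:
--     values_as_text: list[str] = []
--
--     sorted_digits_with_position = sorted(index_digits, key=lambda item: item[0])
--     prev_index, series_count = None, 0
--
--     for [index, value] in sorted_digits_with_position:
--         if prev_index is None:
--             values_as_text.append(str(value))
--         elif prev_index == index - 1: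
--             values_as_text[series_count] += str(value)
--         else:
--             series_count += 1
--             values_as_text.append(str(value))
--
--         prev_index = index
--
--     return reduce(parse_to_integers, values_as_text, [])
-- ===== SOURCE B (Python) =====
-- def transform_indexed_digits_to_values(index_digits):
--     s = sorted(index_digits, key=lambda item: item[0])
--     n = len(s)
--     # stage 1: positions where a new consecutive-index run starts
--     starts = [p for p in range(n) if p == 0 or s[p][0] != s[p - 1][0] + 1]
--     # stage 2: slice each run out by its boundaries and parse it
--     bounds = starts + [n]
--     return [int("".join(str(v) for _, v in s[a:b]))
--             for a, b in zip(bounds, bounds[1:])]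
-- ===== Notes on version B (the rewrite author's own statement) =====
-- stated objective: alternative
-- what changed: Replaces A's single stateful pass (prev_index/series_count state with in-place string growth, then functools.reduce to parse) by a staged formulation: a comprehension computes the run-start positions of the sorted list, consecutive boundary pairs slice each run out, and each slice is joined and parsed independently.
import Mathlib
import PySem

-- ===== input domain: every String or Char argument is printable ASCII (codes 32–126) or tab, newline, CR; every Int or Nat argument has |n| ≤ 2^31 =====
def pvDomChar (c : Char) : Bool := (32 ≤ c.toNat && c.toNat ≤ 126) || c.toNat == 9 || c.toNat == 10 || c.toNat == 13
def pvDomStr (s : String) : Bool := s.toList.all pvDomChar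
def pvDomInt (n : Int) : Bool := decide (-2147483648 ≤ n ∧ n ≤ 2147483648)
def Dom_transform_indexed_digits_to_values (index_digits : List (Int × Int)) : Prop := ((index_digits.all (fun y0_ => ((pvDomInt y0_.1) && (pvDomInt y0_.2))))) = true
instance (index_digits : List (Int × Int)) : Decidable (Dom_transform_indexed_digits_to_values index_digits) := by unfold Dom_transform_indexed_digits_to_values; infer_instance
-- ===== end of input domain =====

-- B replaces A's stateful accumulation pass (prev_index/series_count with in-place string growth,
-- then functools.reduce) by a staged formulation: compute the run-start positions, slice each run
-- out by its boundaries, and parse the slices; objective: alternative.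

-- ===== PORT A =====
-- helper parse_to_integers: values.append(int(value)); int() raising ValueError is excluded by Pre_
def pvParseToIntegers (values : List Int) (value : String) : List Int :=
  values ++ [(PySem.Int.ofStr? value).getD 0]

-- one iteration of A's for-loop; state = (values_as_text, prev_index, series_count)
def pvStepA (st : List String × Option Int × Nat) (iv : Int × Int) : List String × Option Int × Nat :=
  match st with
  | (texts, prev, count) =>
    match prev with
    | none => (texts ++ [PySem.Int.toStr iv.2], some iv.1, count)
    | some p =>
      if p = iv.1 - 1 then
        -- values_as_text[series_count] += str(value); the index is always in range here
        (texts.set count ((texts[count]?.getD "") ++ PySem.Int.toStr iv.2), some iv.1, count)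
      else
        (texts ++ [PySem.Int.toStr iv.2], some iv.1, count + 1)

def transform_indexed_digits_to_values (index_digits : List (Int × Int)) : List Int :=
  let sorted_digits_with_position := PySem.List.sorted index_digits (fun item => item.1)
  let st := sorted_digits_with_position.foldl pvStepA ([], none, 0)
  st.1.foldl pvParseToIntegers []

-- ===== PORT B =====
-- the comprehension filter: p == 0 or s[p][0] != s[p-1][0] + 1  (both indices in range when read)
def pvIsRunStart (s : List (Int × Int)) (p : Int) : Bool :=
  p == 0 || !((PySem.List.pyGetD s p (0, 0)).1 == (PySem.List.pyGetD s (p - 1) (0, 0)).1 + 1)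

-- the result comprehension's body: int("".join(str(v) for _, v in s[a:b]))
def pvParseRun (s : List (Int × Int)) (ab : Int × Int) : Int :=
  (PySem.Int.ofStr? (PySem.Str.join ""
    ((PySem.List.slice s (some ab.1) (some ab.2)).map (fun iv => PySem.Int.toStr iv.2)))).getD 0

def transform_indexed_digits_to_values_alt (index_digits : List (Int × Int)) : List Int :=
  let s := PySem.List.sorted index_digits (fun item => item.1)
  let n : Int := PySem.List.len s
  let starts := (PySem.List.pyRange 0 n 1).filter (pvIsRunStart s)
  let bounds := starts ++ [n]
  (bounds.zip bounds.tail).map (pvParseRun s)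

-- ===== PRECONDITION & SPEC =====
-- Pre_ excludes exactly the inputs where A raises ValueError: a negative value that continues a
-- run (its sorted predecessor has index one smaller) puts '-' in the middle of the text int() parses.
def Pre_transform_indexed_digits_to_values (index_digits : List (Int × Int)) : Prop :=
  List.IsChain (fun p q : Int × Int => q.1 = p.1 + 1 → 0 ≤ q.2)
    (PySem.List.sorted index_digits (fun item => item.1))

instance (index_digits : List (Int × Int)) : Decidable (Pre_transform_indexed_digits_to_values index_digits) := by
  unfold Pre_transform_indexed_digits_to_values; infer_instance

def pvWitness_transform_indexed_digits_to_values : (List (Int × Int)) := [(3, 4), (0, -1), (1, 2)]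

def Spec_transform_indexed_digits_to_values (index_digits : List (Int × Int)) (out : List Int) : Prop := out = transform_indexed_digits_to_values_alt index_digits
instance (index_digits : List (Int × Int)) (out : List Int) : Decidable (Spec_transform_indexed_digits_to_values index_digits out) := by unfold Spec_transform_indexed_digits_to_values; infer_instance

-- ===== CLAIM (what is proved, stated in full; the proofs are below) =====
def Claim_equal_transform_indexed_digits_to_values : Prop := ∀ (index_digits : List (Int × Int)), Dom_transform_indexed_digits_to_values index_digits → Pre_transform_indexed_digits_to_values index_digits → Spec_transform_indexed_digits_to_values index_digits (transform_indexed_digits_to_values index_digits)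

-- ===== LEMMAS AND PROOFS =====

-- the common reference object: the maximal consecutive-index runs of the sorted list
def pvTakeRun : Int → List (Int × Int) → List (Int × Int) × List (Int × Int)
  | _, [] => ([], [])
  | p, (i, v) :: ys =>
    if p = i - 1 then
      ((i, v) :: (pvTakeRun i ys).1, (pvTakeRun i ys).2)
    else ([], (i, v) :: ys)

theorem pv_takeRun_len : ∀ (ys : List (Int × Int)) (p : Int), (pvTakeRun p ys).2.length ≤ ys.length := by
  intro ys
  induction ys with
  | nil => intro p; simp [pvTakeRun]
  | cons iv ys ih =>
    intro p
    obtain ⟨i, v⟩ := iv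
    by_cases h : p = i - 1 <;> simp [pvTakeRun, h]
    exact Nat.le_succ_of_le (ih i)

def pvChunks : List (Int × Int) → List (List (Int × Int))
  | [] => []
  | (i, v) :: xs => ((i, v) :: (pvTakeRun i xs).1) :: pvChunks (pvTakeRun i xs).2
termination_by s => s.length
decreasing_by
  simpa using Nat.lt_succ_of_le (pv_takeRun_len xs i)

-- the text of a run
def pvText (c : List (Int × Int)) : String :=
  PySem.Str.join "" (c.map (fun iv => PySem.Int.toStr iv.2))

theorem pvJoin_cons (a : String) (l : List String) :
    PySem.Str.join "" (a :: l) = a ++ PySem.Str.join "" l := by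
  cases l <;> simp [PySem.Str.join, PySem.Chars.join_singleton, PySem.Chars.join_cons_cons]

theorem pvText_nil : pvText [] = "" := by
  simp [pvText, PySem.Str.join, PySem.Chars.join_nil]

theorem pvText_cons (iv : Int × Int) (c : List (Int × Int)) :
    pvText (iv :: c) = PySem.Int.toStr iv.2 ++ pvText c := by
  simp [pvText, pvJoin_cons]

theorem pv_takeRun_append : ∀ (ys : List (Int × Int)) (p : Int),
    (pvTakeRun p ys).1 ++ (pvTakeRun p ys).2 = ys := by
  intro ys
  induction ys with
  | nil => intro p; simp [pvTakeRun]
  | cons iv ys ih =>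
    intro p
    obtain ⟨i, v⟩ := iv
    by_cases h : p = i - 1 <;> simp [pvTakeRun, h, ih]

theorem pv_takeRun_getD : ∀ (ys : List (Int × Int)) (p : Int) (k : Nat),
    k < (pvTakeRun p ys).1.length →
    ((pvTakeRun p ys).1.getD k (0, 0)).1 = p + 1 + k := by
  intro ys
  induction ys with
  | nil => intro p k hk; simp [pvTakeRun] at hk
  | cons iv ys ih =>
    intro p k hk
    obtain ⟨i, v⟩ := iv
    by_cases h : p = i - 1
    · simp only [pvTakeRun, if_pos h] at hk ⊢
      cases k with
      | zero => simp; omega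
      | succ k =>
        simp only [List.getD_cons_succ, List.length_cons] at hk ⊢
        rw [ih i k (by omega)]
        omega
    · simp [pvTakeRun, if_neg h] at hk
theorem pv_takeRun_break : ∀ (ys : List (Int × Int)) (p : Int) (y : Int × Int) (rest : List (Int × Int)),
    (pvTakeRun p ys).2 = y :: rest → y.1 ≠ p + (pvTakeRun p ys).1.length + 1 := by
  intro ys
  induction ys with
  | nil => intro p y rest h; simp [pvTakeRun] at h
  | cons iv ys ih =>
    intro p y rest h
    obtain ⟨i, v⟩ := iv
    by_cases hp : p = i - 1
    · simp only [pvTakeRun, if_pos hp] at h ⊢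
      have := ih i y rest h
      simp only [List.length_cons]
      omega
    · simp only [pvTakeRun, if_neg hp] at h ⊢
      cases h
      simp
      omega

-- A's forward loop after the first element, as a recursion
def pvProcA : String → Int → List (Int × Int) → List String
  | cur, _, [] => [cur]
  | cur, prev, (i, v) :: rest =>
    if prev = i - 1 then pvProcA (cur ++ PySem.Int.toStr v) i rest
    else cur :: pvProcA (PySem.Int.toStr v) i rest

theorem pv_set_concat (l : List String) (a b : String) :
    (l ++ [a]).set l.length b = l ++ [b] := by
  induction l with
  | nil => rfl
  | cons x xs ih => simp [ih]

theorem pv_foldlA (rest : List (Int × Int)) :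
    ∀ (done : List String) (cur : String) (prev : Int),
      (rest.foldl pvStepA (done ++ [cur], some prev, done.length)).1
        = done ++ pvProcA cur prev rest := by
  induction rest with
  | nil => intro done cur prev; simp [pvProcA]
  | cons iv r ih =>
    intro done cur prev
    obtain ⟨i, v⟩ := iv
    by_cases h : prev = i - 1
    · simp only [List.foldl_cons, pvStepA, h, pvProcA,
        List.getElem?_concat_length, Option.getD_some, pv_set_concat]
      exact ih done (cur ++ PySem.Int.toStr v) i
    · simp only [List.foldl_cons, pvStepA, if_neg h, pvProcA]
      have : done.length + 1 = (done ++ [cur]).length := by simp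
      rw [this, ih (done ++ [cur]) (PySem.Int.toStr v) i]
      simp

theorem pv_procA_chunks : ∀ (rest : List (Int × Int)) (cur : String) (prev : Int),
    pvProcA cur prev rest
      = (cur ++ pvText (pvTakeRun prev rest).1)
        :: (pvChunks (pvTakeRun prev rest).2).map pvText := by
  intro rest
  induction rest with
  | nil =>
    intro cur prev
    simp [pvProcA, pvTakeRun, pvText_nil, pvChunks]
  | cons iv ys ih =>
    intro cur prev
    obtain ⟨i, v⟩ := iv
    by_cases h : prev = i - 1
    · simp only [pvProcA, if_pos h, pvTakeRun, ih, pvText_cons, String.append_assoc]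
    · simp only [pvProcA, if_neg h, pvTakeRun, ih, pvText_cons, pvText_nil,
        String.append_empty, pvChunks, List.map_cons]

-- A's texts are the run texts
theorem pv_texts_eq_chunks (s : List (Int × Int)) :
    (s.foldl pvStepA ([], none, 0)).1 = (pvChunks s).map pvText := by
  cases s with
  | nil => simp [pvChunks]
  | cons iv rest =>
    obtain ⟨i, v⟩ := iv
    have h0 : pvStepA ([], none, 0) (i, v) = ([] ++ [PySem.Int.toStr v], some i, List.length ([] : List String)) := by
      simp [pvStepA]
    rw [List.foldl_cons, h0, pv_foldlA rest [] (PySem.Int.toStr v) i,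
      pv_procA_chunks rest (PySem.Int.toStr v) i]
    simp [pvChunks, pvText_cons]

theorem pv_fold_parse (l : List String) :
    ∀ init, l.foldl pvParseToIntegers init = init ++ l.map (fun t => (PySem.Int.ofStr? t).getD 0) := by
  induction l with
  | nil => intro init; simp
  | cons t ts ih => intro init; simp [pvParseToIntegers, ih]

-- ----- B side -----
def pvStarts (s : List (Int × Int)) : List Int :=
  (PySem.List.pyRange 0 (PySem.List.len s) 1).filter (pvIsRunStart s)

def pvBounds (s : List (Int × Int)) : List Int := pvStarts s ++ [PySem.List.len s]

def pvB (s : List (Int × Int)) : List Int :=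
  ((pvBounds s).zip (pvBounds s).tail).map (pvParseRun s)

-- helper facts about pvStarts / pvBounds
theorem pv_isRunStart_zero (s : List (Int × Int)) : pvIsRunStart s 0 = true := by
  simp [pvIsRunStart]

theorem pv_bounds_head (r : List (Int × Int)) : ∃ tl, pvBounds r = 0 :: tl := by
  cases r with
  | nil => exact ⟨[], rfl⟩
  | cons y ys =>
    refine ⟨(((List.range ys.length).map Nat.succ).filter
        ((pvIsRunStart (y :: ys)) ∘ (fun k : Nat => (k : Int)))).map (fun k : Nat => (k : Int)) ++
        [PySem.List.len (y :: ys)], ?_⟩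
    unfold pvBounds pvStarts
    rw [PySem.List.len_eq, show ((y :: ys).length : Int) = (((ys.length + 1 : Nat)) : Int) by simp,
      PySem.List.pyRange_zero_nat, List.filter_map, List.range_succ_eq_map,
      List.filter_cons_of_pos (by simpa using pv_isRunStart_zero (y :: ys)),
      List.map_cons, Nat.cast_zero, List.cons_append]

theorem pv_bounds_nonneg (r : List (Int × Int)) : ∀ x ∈ pvBounds r, 0 ≤ x := by
  intro x hx
  unfold pvBounds pvStarts at hx
  rcases List.mem_append.mp hx with h | h
  · exact (PySem.List.mem_pyRange_one.mp (List.mem_of_mem_filter h)).1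
  · simp only [List.mem_singleton] at h
    subst h
    simp [PySem.List.len_eq]

set_option maxHeartbeats 1600000 in
theorem pv_B_chunks : ∀ (s : List (Int × Int)),
    pvB s = (pvChunks s).map (fun c => (PySem.Int.ofStr? (pvText c)).getD 0) := by
  suffices H : ∀ (N : Nat) (s : List (Int × Int)), s.length ≤ N →
      pvB s = (pvChunks s).map (fun c => (PySem.Int.ofStr? (pvText c)).getD 0) by
    exact fun s => H s.length s le_rfl
  intro N
  induction N with
  | zero =>
    intro s hs
    have hnil : s = [] := List.eq_nil_of_length_eq_zero (Nat.le_zero.mp hs)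
    subst hnil
    simp only [pvChunks, List.map_nil]
    rfl
  | succ N ih =>
    intro s hs
    match s with
    | [] => simp only [pvChunks, List.map_nil]; rfl
    | (i₀, v₀) :: xs =>
      have hxs : (pvTakeRun i₀ xs).1 ++ (pvTakeRun i₀ xs).2 = xs := pv_takeRun_append xs i₀
      set t1 := (pvTakeRun i₀ xs).1 with ht1
      set r := (pvTakeRun i₀ xs).2 with hr2
      set c : List (Int × Int) := (i₀, v₀) :: t1 with hc
      set L : Nat := t1.length + 1 with hL
      set m : Nat := r.length with hm
      have hcL : c.length = L := by simp [hc, hL]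
      have hs_eq : (i₀, v₀) :: xs = c ++ r := by rw [hc, ← hxs]; rfl
      have hnlen : ((i₀, v₀) :: xs).length = L + m := by
        rw [hs_eq]; simp [hcL, hm]
      -- index formula on the chunk part
      have hidx : ∀ k : Nat, k < L → (((i₀, v₀) :: xs).getD k (0, 0)).1 = i₀ + (k : Int) := by
        intro k hk
        rw [hs_eq, List.getD_append _ _ _ k (by omega)]
        cases k with
        | zero => simp [hc]
        | succ k =>
          have hkk : k < t1.length := by omega
          have hgd : (t1.getD k (0, 0)).1 = i₀ + 1 + (k : Int) := pv_takeRun_getD xs i₀ k hkk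
          rw [hc, List.getD_cons_succ, hgd]
          push_cast
          ring
      -- inner positions of the chunk are not run starts
      have hPmid : ∀ k : Nat, 1 ≤ k → k < L → pvIsRunStart ((i₀, v₀) :: xs) (k : Int) = false := by
        intro k h1 h2
        have ha := hidx k h2
        have hb := hidx (k - 1) (by omega)
        have hcast : (k : Int) - 1 = ((k - 1 : Nat) : Int) := by omega
        simp only [pvIsRunStart, hcast, PySem.List.pyGetD_natCast, ha, hb]
        simp only [Bool.or_eq_false_iff]
        constructor
        · simp; omega
        · simp; omega
      -- positions past the chunk behave like positions of the rest
      have hgr : ∀ j : Nat, ((i₀, v₀) :: xs).getD (L + j) (0, 0) = r.getD j (0, 0) := by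
        intro j
        rw [hs_eq, List.getD_append_right _ _ _ _ (by omega)]
        congr 1
        omega
      have hshift : ∀ k : Nat, k < m →
          pvIsRunStart ((i₀, v₀) :: xs) ((L + k : Nat) : Int) = pvIsRunStart r (k : Int) := by
        intro k hk
        have hLk0 : (((L + k : Nat) : Int) == 0) = false := by simp; omega
        cases k with
        | zero =>
          cases hrr : r with
          | nil => rw [hrr] at hm; simp at hm; omega
          | cons y rest =>
            have hbrk : y.1 ≠ i₀ + ((t1.length : Nat) : Int) + 1 := by
              have hb := pv_takeRun_break xs i₀ y rest (by rw [← hr2]; exact hrr)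
              simpa using hb
            have hgetL : ((i₀, v₀) :: xs).getD (L + 0) (0, 0) = y := by
              rw [hgr 0, hrr]; rfl
            have hgetL1 : (((i₀, v₀) :: xs).getD (L - 1) (0, 0)).1 = i₀ + ((L - 1 : Nat) : Int) :=
              hidx (L - 1) (by omega)
            have hcast1 : ((L + 0 : Nat) : Int) - 1 = ((L - 1 : Nat) : Int) := by omega
            simp only [pvIsRunStart, hcast1, PySem.List.pyGetD_natCast, hgetL, hgetL1, hLk0,
              Bool.false_or, Nat.cast_zero, BEq.rfl, Bool.true_or]
            simp only [Bool.not_eq_true', beq_eq_false_iff_ne]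
            have hL1 : L - 1 = t1.length := by omega
            rw [hL1]
            exact hbrk
        | succ k =>
          have h1 : ((L + (k + 1) : Nat) : Int) - 1 = ((L + k : Nat) : Int) := by push_cast; ring
          have h2 : (((k + 1 : Nat)) : Int) - 1 = ((k : Nat) : Int) := by push_cast; ring
          have hz2 : ((((k + 1 : Nat)) : Int) == 0) = false := by
            simp only [beq_eq_false_iff_ne]; push_cast; omega
          simp only [pvIsRunStart, h1, h2, PySem.List.pyGetD_natCast, hgr, hLk0, hz2]
      -- the start positions decompose: 0, then the rest's starts shifted by L
      have hstarts : pvStarts ((i₀, v₀) :: xs) = 0 :: (pvStarts r).map (fun a => (L : Int) + a) := by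
        unfold pvStarts
        rw [PySem.List.len_eq, show (((i₀, v₀) :: xs).length : Int) = ((L + m : Nat) : Int) by
          rw [hnlen], PySem.List.pyRange_zero_nat, List.filter_map, List.range_add,
          List.filter_append]
        have h1 : (List.range L).filter ((pvIsRunStart ((i₀, v₀) :: xs)) ∘ (fun k : Nat => (k : Int))) = [0] := by
          rw [hL, List.range_succ_eq_map,
            List.filter_cons_of_pos (by simpa using pv_isRunStart_zero ((i₀, v₀) :: xs))]
          rw [List.filter_map, show ((List.range t1.length).filter
              (((pvIsRunStart ((i₀, v₀) :: xs)) ∘ (fun k : Nat => (k : Int))) ∘ Nat.succ)) = [] from ?_]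
          · rfl
          · rw [List.filter_eq_nil_iff]
            intro j hj
            have hj' := List.mem_range.mp hj
            simp only [Function.comp_apply]
            rw [hPmid (Nat.succ j) (by omega) (by omega)]
            simp
        have h2 : ((List.range m).map (fun x => L + x)).filter
              ((pvIsRunStart ((i₀, v₀) :: xs)) ∘ (fun k : Nat => (k : Int)))
            = ((List.range m).filter ((pvIsRunStart r) ∘ (fun k : Nat => (k : Int)))).map (fun x => L + x) := by
          rw [List.filter_map]
          congr 1
          apply List.filter_congr
          intro k hk
          have := hshift k (List.mem_range.mp hk)
          simpa [Function.comp] using this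
        rw [h1, h2, show PySem.List.len r = ((m : Nat) : Int) from by rw [PySem.List.len_eq, hm],
          PySem.List.pyRange_zero_nat, List.filter_map]
        simp only [List.map_cons, List.map_map, Nat.cast_zero, List.cons_append, List.nil_append]
        congr 1
      have hlen2 : PySem.List.len ((i₀, v₀) :: xs) = (L : Int) + PySem.List.len r := by
        simp only [PySem.List.len_eq, hnlen]
        push_cast
        omega
      have hbounds : pvBounds ((i₀, v₀) :: xs) = 0 :: (pvBounds r).map (fun a => (L : Int) + a) := by
        unfold pvBounds
        rw [hstarts, hlen2, List.map_append]
        simp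
      -- the slice between shifted bounds is the slice of the rest
      have hslice2 : ∀ a b : Int, 0 ≤ a → 0 ≤ b →
          PySem.List.slice ((i₀, v₀) :: xs) (some ((L : Int) + a)) (some ((L : Int) + b))
            = PySem.List.slice r (some a) (some b) := by
        intro a b ha0 hb0
        rw [PySem.List.slice_toNat _ (by omega) (by omega), PySem.List.slice_toNat _ ha0 hb0]
        have h1 : ((L : Int) + a).toNat = L + a.toNat := by omega
        have h2 : ((L : Int) + b).toNat = L + b.toNat := by omega
        rw [hs_eq, List.drop_append, h1, h2,
          List.drop_eq_nil_of_le (by omega : c.length ≤ L + a.toNat), hcL]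
        have h3 : L + a.toNat - L = a.toNat := by omega
        have h4 : L + b.toNat - (L + a.toNat) = b.toNat - a.toNat := by omega
        rw [h3, h4, List.nil_append]
      -- assemble
      obtain ⟨tl, htl⟩ := pv_bounds_head r
      have hr_len : r.length ≤ N := by
        have hlr := pv_takeRun_len xs i₀
        rw [← hr2] at hlr
        have hx : xs.length ≤ N := by simpa using hs
        omega
      have hihr := ih r hr_len
      have hX : (pvBounds r).map (fun a => (L : Int) + a) = (L : Int) :: tl.map (fun a => (L : Int) + a) := by
        rw [htl]; simp
      have htlmap : tl.map (fun a => (L : Int) + a) = ((pvBounds r).tail).map (fun a => (L : Int) + a) := by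
        rw [htl, List.tail_cons]
      have hfirst : pvParseRun ((i₀, v₀) :: xs) (0, (L : Int)) = (PySem.Int.ofStr? (pvText c)).getD 0 := by
        have hsl : PySem.List.slice ((i₀, v₀) :: xs) (some (0 : Int)) (some ((L : Int))) = c := by
          rw [PySem.List.slice_zero_start, PySem.List.slice_to_natCast, hs_eq, ← hcL, List.take_left]
        unfold pvParseRun pvText
        rw [hsl]
      have hrest : ∀ ab ∈ (pvBounds r).zip ((pvBounds r).tail),
          pvParseRun ((i₀, v₀) :: xs) (Prod.map (fun a => (L : Int) + a) (fun a => (L : Int) + a) ab)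
            = pvParseRun r ab := by
        rintro ⟨a, b⟩ hab
        obtain ⟨ha, hb⟩ := List.of_mem_zip hab
        have ha0 : 0 ≤ a := pv_bounds_nonneg r a ha
        have hb0 : 0 ≤ b := pv_bounds_nonneg r b (List.mem_of_mem_tail hb)
        unfold pvParseRun
        rw [Prod.map_apply]
        simp only []
        rw [hslice2 a b ha0 hb0]
      show pvB ((i₀, v₀) :: xs) = _
      unfold pvB
      rw [hbounds, List.tail_cons, hX, List.zip_cons_cons, ← hX, htlmap, List.zip_map,
        List.map_cons, List.map_map]
      have hmapeq : ((pvBounds r).zip ((pvBounds r).tail)).map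
            ((pvParseRun ((i₀, v₀) :: xs)) ∘ (Prod.map (fun a => (L : Int) + a) (fun a => (L : Int) + a)))
          = ((pvBounds r).zip ((pvBounds r).tail)).map (pvParseRun r) := by
        apply List.map_congr_left
        intro ab hab
        simp only [Function.comp_apply]
        exact hrest ab hab
      rw [hmapeq, hfirst]
      rw [show pvChunks ((i₀, v₀) :: xs) = c :: pvChunks r from by simp only [pvChunks]; rfl]
      rw [List.map_cons, ← hihr]
      rfl

-- ===== VERDICT (by name: the statement is the Claim_ definition above) =====
theorem transform_indexed_digits_to_values_spec : Claim_equal_transform_indexed_digits_to_values := by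
  intro l _ _
  unfold Spec_transform_indexed_digits_to_values
  unfold transform_indexed_digits_to_values transform_indexed_digits_to_values_alt
  show _ = pvB (PySem.List.sorted l (fun item => item.1))
  rw [pv_B_chunks]
  simp only [pv_texts_eq_chunks, pv_fold_parse, List.nil_append, List.map_map]
  rfl
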